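-- pv_equiv track=rewrite | github.com/rookinc/hyperxi_lab | scripts/pair_fiber_graph_invariants.py | common_neighbor_profile
-- ===== SOURCE A (Python) =====
-- from collections import Counter, defaultdict
--
-- def common_neighbor_profile(adj):
--     nodes = sorted(adj)
--     prof_adj = Counter()
--     prof_non = Counter()
--
--     for i, u in enumerate(nodes):
--         for v in nodes[i + 1:]:
--             c = len(adj[u] & adj[v])
--             if v in adj[u]:
--                 prof_adj[c] += 1
--             else:
--                 prof_non[c] += 1
--
--     return prof_adj, prof_non
-- ===== SOURCE B (Python) =====
-- from collections import Counter
--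
-- def common_neighbor_profile(adj):
--     nodes = sorted(adj)
--     # inverted index: inv[w] = list of keys x (in sorted order) whose neighbor set contains w
--     inv = {}
--     for x in nodes:
--         for w in adj[x]:
--             inv.setdefault(w, []).append(x)
--     # stage 1: one flat record (common-count, adjacent?) per pair u < v, via wedge counting
--     records = []
--     for i, u in enumerate(nodes):
--         cnt = {}
--         for w in adj[u]:
--             for x in inv[w]:
--                 cnt[x] = cnt.get(x, 0) + 1
--         records += [(cnt.get(v, 0), v in adj[u]) for v in nodes[i + 1:]]
--     # stage 2: split the records and count each stream at once
--     prof_adj = Counter(c for c, hit in records if hit)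
--     prof_non = Counter(c for c, hit in records if not hit)
--     return prof_adj, prof_non
-- ===== Notes on version B (the rewrite author's own statement) =====
-- stated objective: faster
-- what changed: A intersects two sets for every node pair inside a nested pair loop; B builds an inverted neighbor index once, computes each node's common-neighbor counts by wedge counting, emits a flat list of (count, adjacent?) records, and produces the two profiles as Counters of the two filtered record streams.
import Mathlib
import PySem

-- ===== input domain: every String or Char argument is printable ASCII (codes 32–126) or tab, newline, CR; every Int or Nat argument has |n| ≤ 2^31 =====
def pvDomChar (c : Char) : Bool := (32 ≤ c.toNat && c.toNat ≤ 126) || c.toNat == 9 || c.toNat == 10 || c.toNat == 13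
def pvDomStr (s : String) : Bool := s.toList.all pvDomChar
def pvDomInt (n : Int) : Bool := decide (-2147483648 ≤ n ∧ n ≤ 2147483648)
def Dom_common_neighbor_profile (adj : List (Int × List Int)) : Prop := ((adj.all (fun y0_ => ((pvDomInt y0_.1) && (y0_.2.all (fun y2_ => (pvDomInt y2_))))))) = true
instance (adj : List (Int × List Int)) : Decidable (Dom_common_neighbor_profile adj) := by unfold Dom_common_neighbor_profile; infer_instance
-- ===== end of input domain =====

-- B replaces A's per-pair set intersections by inverted-index wedge counting, staged as a flat
-- record list that two Counter passes then split — no intersection is ever built.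

-- ===== PORT A =====
-- the dict[int, set[int]] argument arrives as an assoc list: dict(...)-with-set-values semantics
def pvToDict (adj : List (Int × List Int)) : PySem.Dict Int (PySem.Set Int) :=
  adj.foldl (fun d p => d.insert p.1 (PySem.Set.ofList p.2)) PySem.Dict.empty

def common_neighbor_profile (adj : List (Int × List Int)) : (List (Int × Int)) × (List (Int × Int)) :=
  let d := pvToDict adj
  let nodes := PySem.List.sorted d.keys (fun x => x) false   -- sorted(adj)
  -- adj[u] for u a key: getD with an empty default is exact (u ∈ keys, no KeyError)
  let r := (PySem.List.enumerate nodes 0).foldl (fun st iu =>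
      (PySem.List.slice nodes (some (iu.1 + 1)) none).foldl (fun st v =>
        let c : Int := PySem.Set.len (PySem.Set.inter (d.getD iu.2 PySem.Set.empty) (d.getD v PySem.Set.empty))
        if PySem.Set.contains (d.getD iu.2 PySem.Set.empty) v then
          (st.1.modify c 0 (· + 1), st.2)                     -- prof_adj[c] += 1
        else
          (st.1, st.2.modify c 0 (· + 1))) st)                -- prof_non[c] += 1
    (PySem.Dict.empty, PySem.Dict.empty)
  (r.1.items, r.2.items)

-- ===== PORT B =====
def common_neighbor_profile_alt (adj : List (Int × List Int)) : (List (Int × Int)) × (List (Int × Int)) :=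
  let d := pvToDict adj
  let nodes := PySem.List.sorted d.keys (fun x => x) false
  -- inv.setdefault(w, []).append(x)  =  modify w [] (· ++ [x]); iterating the set adj[x] is order-insensitive here
  let inv : PySem.Dict Int (List Int) := nodes.foldl (fun inv x =>
      (d.getD x PySem.Set.empty).foldl (fun inv w => inv.modify w [] (· ++ [x])) inv) PySem.Dict.empty
  -- stage 1: records += [(cnt.get(v, 0), v in adj[u]) for v in nodes[i+1:]]
  let records : List (Int × Bool) := (PySem.List.enumerate nodes 0).foldl (fun rs iu =>
      let au := d.getD iu.2 PySem.Set.empty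
      let cnt : PySem.Dict Int Int := au.foldl (fun cnt w =>
          (inv.getD w []).foldl (fun cnt x => cnt.modify x 0 (· + 1)) cnt) PySem.Dict.empty
      rs ++ (PySem.List.slice nodes (some (iu.1 + 1)) none).map
              (fun v => (cnt.getD v 0, PySem.Set.contains au v))) []
  -- stage 2: Counter(c for c, hit in records if hit) / (… if not hit)
  let profAdj := PySem.Dict.counter ((records.filter (fun r => r.2)).map (fun r => r.1))
  let profNon := PySem.Dict.counter ((records.filter (fun r => !r.2)).map (fun r => r.1))
  (profAdj.items, profNon.items)

-- ===== PRECONDITION & SPEC =====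
def Spec_common_neighbor_profile (adj : List (Int × List Int)) (out : (List (Int × Int)) × (List (Int × Int))) : Prop := out = common_neighbor_profile_alt adj
instance (adj : List (Int × List Int)) (out : (List (Int × Int)) × (List (Int × Int))) : Decidable (Spec_common_neighbor_profile adj out) := by unfold Spec_common_neighbor_profile; infer_instance

-- ===== CLAIM (what is proved, stated in full; the proofs are below) =====
def Claim_equal_common_neighbor_profile : Prop := ∀ (adj : List (Int × List Int)), Dom_common_neighbor_profile adj → Spec_common_neighbor_profile adj (common_neighbor_profile adj)

-- ===== LEMMAS AND PROOFS =====

-- every value stored by pvToDict is a PySem.Set, hence Nodup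
theorem pv_get?_foldl_nodup (l : List (Int × List Int)) (d : PySem.Dict Int (PySem.Set Int))
    (h : ∀ k s, d.get? k = some s → s.Nodup) :
    ∀ k s, (l.foldl (fun d p => d.insert p.1 (PySem.Set.ofList p.2)) d).get? k = some s → s.Nodup := by
  induction l generalizing d with
  | nil => exact h
  | cons p t ih =>
    intro k s
    simp only [List.foldl_cons]
    refine ih _ ?_ k s
    intro k s hk
    rw [PySem.Dict.get?_insert] at hk
    split at hk
    · cases hk; exact PySem.Set.nodup_ofList _
    · exact h _ _ hk

theorem pv_getD_nodup (adj : List (Int × List Int)) (k : Int) :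
    ((pvToDict adj).getD k PySem.Set.empty).Nodup := by
  rw [PySem.Dict.getD_eq_get?_getD]
  cases hg : (pvToDict adj).get? k with
  | none => simp [PySem.Set.empty]
  | some s =>
    simpa using pv_get?_foldl_nodup adj PySem.Dict.empty
      (by intro k s hk; rw [PySem.Dict.get?_empty] at hk; cases hk) k s hg

theorem pv_nodes_nodup (adj : List (Int × List Int)) :
    (PySem.List.sorted (pvToDict adj).keys (fun x => x) false).Nodup := by
  refine ((PySem.List.sorted_perm _ _ _).nodup_iff).mpr ?_
  exact PySem.Dict.nodup_keys_foldl_insert_key adj (fun p => p.1)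
    (fun d p => PySem.Set.ofList p.2) PySem.Dict.empty (by simp [PySem.Dict.keys_empty])

-- one node x appending itself under each of its neighbors
theorem pv_inv_inner_count (x : Int) (ax : List Int) :
    ∀ (inv : PySem.Dict Int (List Int)) (c v : Int),
    ((ax.foldl (fun inv w => inv.modify w [] (· ++ [x])) inv).getD c []).count v
      = (inv.getD c []).count v + ax.count c * (if x = v then 1 else 0) := by
  induction ax with
  | nil => simp
  | cons w t ih =>
    intro inv c v
    simp only [List.foldl_cons, ih, PySem.Dict.getD_modify]
    by_cases hc : c = w <;> by_cases hx : x = v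
    · subst hc; subst hx
      simp [List.count_append]
      omega
    · subst hc
      simp [List.count_append, hx]
    · subst hx
      simp [hc, Ne.symm hc]
    · simp [hc, hx, Ne.symm hc]

-- inv.getD c [] counts v: once per occurrence of c in f v, provided v is picked from ns
theorem pv_inv_count (f : Int → List Int) (ns : List Int) :
    ∀ (inv0 : PySem.Dict Int (List Int)) (c v : Int),
    ((ns.foldl (fun inv x => (f x).foldl (fun inv w => inv.modify w [] (· ++ [x])) inv) inv0).getD c []).count v
      = (inv0.getD c []).count v + (ns.map (fun x => if x = v then (f x).count c else 0)).sum := by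
  induction ns with
  | nil => simp
  | cons x t ih =>
    intro inv0 c v
    simp only [List.foldl_cons, ih, pv_inv_inner_count, List.map_cons, List.sum_cons]
    split_ifs <;> simp <;> try ring

theorem pv_sum_zero (g : Int → Nat) (ns : List Int) (v : Int) (hv : v ∉ ns) :
    (ns.map (fun x => if x = v then g x else 0)).sum = 0 := by
  induction ns with
  | nil => simp
  | cons x t ih =>
    simp only [List.mem_cons, not_or] at hv
    simp [Ne.symm hv.1, ih hv.2]

theorem pv_sum_pick (g : Int → Nat) (ns : List Int) (v : Int) (hnd : ns.Nodup) (hv : v ∈ ns) :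
    (ns.map (fun x => if x = v then g x else 0)).sum = g v := by
  induction ns with
  | nil => cases hv
  | cons x t ih =>
    obtain ⟨hx, hnd'⟩ := List.nodup_cons.mp hnd
    simp only [List.map_cons, List.sum_cons]
    rcases List.mem_cons.mp hv with h | h
    · subst h
      rw [if_pos rfl, pv_sum_zero _ _ _ hx, Nat.add_zero]
    · have : x ≠ v := fun e => hx (e ▸ h)
      rw [if_neg this, ih hnd' h, Nat.zero_add]

-- the per-node wedge counter
theorem pv_cnt_getD (g : Int → List Int) (l : List Int) :
    ∀ (cnt : PySem.Dict Int Int) (v : Int),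
    ((l.foldl (fun cnt w => (g w).foldl (fun cnt x => cnt.modify x 0 (· + 1)) cnt) cnt).getD v 0)
      = cnt.getD v 0 + (l.map (fun w => (((g w).count v : Int)))).sum := by
  induction l with
  | nil => simp
  | cons w t ih =>
    intro cnt v
    simp only [List.foldl_cons, ih, PySem.Dict.getD_foldl_modify_add_one, List.map_cons, List.sum_cons]
    ring

theorem pv_sum_boole (p : Int → Prop) [DecidablePred p] (l : List Int) :
    (l.map (fun w => if p w then (1 : Int) else 0)).sum = (l.countP (fun w => decide (p w)) : Int) := by
  induction l with
  | nil => simp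
  | cons w t ih => by_cases h : p w <;> simp [h, ih]; ring

-- the key fact: B's counter lookup is A's intersection size
theorem pv_pair (adj : List (Int × List Int)) (u v : Int)
    (hv : v ∈ PySem.List.sorted (pvToDict adj).keys (fun x => x) false) :
    (((pvToDict adj).getD u PySem.Set.empty).foldl (fun cnt w =>
        (((PySem.List.sorted (pvToDict adj).keys (fun x => x) false).foldl (fun inv x =>
            ((pvToDict adj).getD x PySem.Set.empty).foldl (fun inv w => inv.modify w [] (· ++ [x])) inv)
          PySem.Dict.empty).getD w []).foldl (fun cnt x => cnt.modify x 0 (· + 1)) cnt)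
      PySem.Dict.empty).getD v 0
    = PySem.Set.len (PySem.Set.inter ((pvToDict adj).getD u PySem.Set.empty)
        ((pvToDict adj).getD v PySem.Set.empty)) := by
  set d := pvToDict adj with hd
  set nodes := PySem.List.sorted d.keys (fun x => x) false with hn
  set av := d.getD v PySem.Set.empty with hav
  rw [pv_cnt_getD]
  rw [PySem.Dict.getD_empty, Int.zero_add]
  have hw : ∀ w : Int,
      ((((nodes.foldl (fun inv x => (d.getD x PySem.Set.empty).foldl
          (fun inv w => inv.modify w [] (· ++ [x])) inv) PySem.Dict.empty).getD w []).count v : Int))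
        = if w ∈ av then (1 : Int) else 0 := by
    intro w
    rw [pv_inv_count (fun x => d.getD x PySem.Set.empty) nodes PySem.Dict.empty w v]
    rw [PySem.Dict.getD_empty]
    simp only [List.count_nil, Nat.zero_add]
    rw [pv_sum_pick (fun x => (d.getD x PySem.Set.empty).count w) nodes v (pv_nodes_nodup adj) hv]
    rw [List.Nodup.count (pv_getD_nodup adj v)]
    split_ifs <;> simp
  rw [List.map_congr_left (fun w _ => hw w)]
  rw [pv_sum_boole (fun w => w ∈ av)]
  simp only [PySem.Set.len, PySem.Set.inter, PySem.Set.contains, List.countP_eq_length_filter]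
  congr 2
  apply List.filter_congr
  intro x _
  simp

-- fold fusion: a nested fold over blocks is a fold over the concatenation of the blocks
theorem pv_foldl_blocks {α β γ : Type} (step : γ → β → γ) (h : α → List β) :
    ∀ (L : List α) (init : γ),
    L.foldl (fun st x => (h x).foldl step st) init = (L.flatMap h).foldl step init := by
  intro L
  induction L with
  | nil => intro init; rfl
  | cons x t ih =>
    intro init
    simp only [List.foldl_cons, List.flatMap_cons, List.foldl_append, ih]

-- splitting an interleaved two-counter fold into two filtered counter folds
theorem pv_split (upd : PySem.Dict Int Int → Int → PySem.Dict Int Int) :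
    ∀ (rs : List (Int × Bool)) (d1 d2 : PySem.Dict Int Int),
    rs.foldl (fun st r => if r.2 then (upd st.1 r.1, st.2) else (st.1, upd st.2 r.1)) (d1, d2)
      = (((rs.filter (fun r => r.2)).map (fun r => r.1)).foldl upd d1,
         ((rs.filter (fun r => !r.2)).map (fun r => r.1)).foldl upd d2) := by
  intro rs
  induction rs with
  | nil => intro d1 d2; rfl
  | cons r t ih =>
    intro d1 d2
    cases hb : r.2 <;> simp [hb, ih]

theorem pv_main (adj : List (Int × List Int)) :
    common_neighbor_profile adj = common_neighbor_profile_alt adj := by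
  simp only [common_neighbor_profile, common_neighbor_profile_alt]
  set d := pvToDict adj with hd
  set nodes := PySem.List.sorted d.keys (fun x => x) false with hn
  set inv := nodes.foldl (fun inv x =>
      (d.getD x PySem.Set.empty).foldl (fun inv w => inv.modify w [] (· ++ [x])) inv)
      PySem.Dict.empty with hinv
  -- the record each pair contributes, and the counter-update step
  set F : Int × Int → Int → Int × Bool := fun iu v =>
    (((d.getD iu.2 PySem.Set.empty).foldl (fun cnt w =>
        (inv.getD w []).foldl (fun cnt x => cnt.modify x 0 (· + 1)) cnt)
      PySem.Dict.empty).getD v 0, PySem.Set.contains (d.getD iu.2 PySem.Set.empty) v) with hF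
  set step : PySem.Dict Int Int × PySem.Dict Int Int → Int × Bool → PySem.Dict Int Int × PySem.Dict Int Int :=
    fun st r => if r.2 then (st.1.modify r.1 0 (· + 1), st.2) else (st.1, st.2.modify r.1 0 (· + 1)) with hstep
  -- 1. A's inner body is step applied to the record F iu v (pv_pair turns the counter lookup into the intersection size)
  have h1 : (PySem.List.enumerate nodes 0).foldl (fun st iu =>
      (PySem.List.slice nodes (some (iu.1 + 1)) none).foldl (fun st v =>
        let c : Int := PySem.Set.len (PySem.Set.inter (d.getD iu.2 PySem.Set.empty) (d.getD v PySem.Set.empty))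
        if PySem.Set.contains (d.getD iu.2 PySem.Set.empty) v then
          (st.1.modify c 0 (· + 1), st.2)
        else (st.1, st.2.modify c 0 (· + 1))) st)
      ((PySem.Dict.empty : PySem.Dict Int Int), (PySem.Dict.empty : PySem.Dict Int Int))
    = (PySem.List.enumerate nodes 0).foldl (fun st iu =>
        ((PySem.List.slice nodes (some (iu.1 + 1)) none).map (F iu)).foldl step st)
      (PySem.Dict.empty, PySem.Dict.empty) := by
    apply PySem.List.foldl_congr_mem
    intro st iu _
    rw [List.foldl_map]
    apply PySem.List.foldl_congr_mem
    intro st v hv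
    have hvn : v ∈ nodes := PySem.List.mem_of_mem_slice _ _ _ hv
    simp only [hF, hstep, hinv]
    rw [pv_pair adj iu.2 v hvn]
  -- 2. fuse the nested fold into one fold over the flat record list (built with ++ as in B)
  have h2 : (PySem.List.enumerate nodes 0).foldl (fun st iu =>
        ((PySem.List.slice nodes (some (iu.1 + 1)) none).map (F iu)).foldl step st)
      ((PySem.Dict.empty : PySem.Dict Int Int), (PySem.Dict.empty : PySem.Dict Int Int))
    = ((PySem.List.enumerate nodes 0).foldl (fun rs iu =>
        rs ++ (PySem.List.slice nodes (some (iu.1 + 1)) none).map (F iu)) []).foldl step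
      (PySem.Dict.empty, PySem.Dict.empty) := by
    rw [pv_foldl_blocks step (fun iu => (PySem.List.slice nodes (some (iu.1 + 1)) none).map (F iu))]
    rw [PySem.List.foldl_append_eq_flatMap]
    rfl
  -- 3. split the interleaved fold into the two Counters of the filtered streams
  rw [h1, h2, pv_split (fun c n => c.modify n 0 (· + 1))]
  rw [PySem.Dict.counter_eq_foldl, PySem.Dict.counter_eq_foldl]

-- ===== VERDICT (by name: the statement is the Claim_ definition above) =====
theorem common_neighbor_profile_spec : Claim_equal_common_neighbor_profile := by
  intro adj _
  unfold Spec_common_neighbor_profile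
  exact pv_main adj
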